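-- pv_equiv track=rewrite | github.com/mathieu-lemay/aoc-2019-py | aoc/d24.py | get_first_repeat_state
-- ===== SOURCE A (Python) =====
-- def tick(state):
--     ns = 0
--
--     for i in range(25):
--         n = 0
--         c = (state >> i) & 1
--
--         y, x = divmod(i, 5)
--         for dx, dy in ((0, -1), (0, 1), (-1, 0), (1, 0)):
--             nx = x + dx
--             ny = y + dy
--             if 0 <= nx < 5 and 0 <= ny < 5:
--                 n += (state >> (ny * 5 + nx)) & 1
--
--         if (c == 1 and n == 1) or (c == 0 and 0 < n < 3):
--             ns |= 1 << i
--
--     return ns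
--
-- def get_first_repeat_state(state):
--     states = set()
--     states.add(state)
--     state = tick(state)
--
--     while state not in states:
--         states.add(state)
--         state = tick(state)
--
--     return state
-- ===== SOURCE B (Python) =====
-- # B: table-driven tick (precomputed neighbour index lists) and a memoryless,
-- # staged repeat search: instead of accumulating seen states in a set, for each
-- # candidate x_m the prefix x_0..x_{m-1} is regenerated from the start and
-- # scanned; the first candidate found in its own prefix is returned.
-- NEIGHBORS = [
--     [j for j in range(25) if abs(j % 5 - i % 5) + abs(j // 5 - i // 5) == 1]
--     for i in range(25)
-- ]
--
--
-- def _tick(s):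
--     out = 0
--     for i in range(25):
--         n = sum((s >> j) & 1 for j in NEIGHBORS[i])
--         if n == 1 if (s >> i) & 1 else 1 <= n <= 2:
--             out |= 1 << i
--     return out
--
--
-- def get_first_repeat_state(state):
--     m, cur = 1, _tick(state)
--     while True:
--         s = state
--         for _ in range(m):
--             if s == cur:
--                 return cur
--             s = _tick(s)
--         m, cur = m + 1, _tick(cur)
-- ===== Notes on version B (the rewrite author's own statement) =====
-- stated objective: alternative
-- what changed: B drops A's growing seen-set entirely: it searches for the first repeat by staged regeneration (for each candidate x_m it re-iterates the tick from the initial state and scans the prefix x_0..x_{m-1} for a match), and its tick uses a precomputed neighbour-index table summed per cell instead of A's divmod plus bounds-checked delta offsets.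
import Mathlib
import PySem

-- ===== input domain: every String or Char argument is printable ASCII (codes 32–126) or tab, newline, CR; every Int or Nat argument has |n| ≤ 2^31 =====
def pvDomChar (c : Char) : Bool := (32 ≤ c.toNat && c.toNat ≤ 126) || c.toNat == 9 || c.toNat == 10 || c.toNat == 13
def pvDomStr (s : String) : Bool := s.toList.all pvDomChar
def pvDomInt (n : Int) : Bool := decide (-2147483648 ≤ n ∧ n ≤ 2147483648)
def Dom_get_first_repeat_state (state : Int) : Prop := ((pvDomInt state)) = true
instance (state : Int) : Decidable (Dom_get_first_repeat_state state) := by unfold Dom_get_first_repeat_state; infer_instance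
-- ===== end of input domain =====

-- B replaces A's seen-set loop by a memoryless staged search (each candidate's prefix is
-- regenerated from the start and scanned) and A's divmod/delta tick by a table-driven one;
-- objective: alternative algorithm, equal return values.

-- ===== PORT A =====
def tickA (state : Int) : Int :=
  (PySem.List.pyRange 0 25 1).foldl (fun ns i =>
    let c := PySem.Int.band (state >>> i.toNat) 1
    let y := PySem.Int.floordiv i 5
    let x := PySem.Int.mod i 5
    let n := ([((0:Int), (-1:Int)), (0, 1), (-1, 0), (1, 0)]).foldl (fun n dxy =>
      let nx := x + dxy.1
      let ny := y + dxy.2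
      if 0 ≤ nx ∧ nx < 5 ∧ 0 ≤ ny ∧ ny < 5 then
        n + (PySem.Int.band (state >>> (ny * 5 + nx).toNat) 1)
      else n) 0
    if (c = 1 ∧ n = 1) ∨ (c = 0 ∧ (0 < n ∧ n < 3)) then PySem.Int.bor ns ((1:Int) <<< i.toNat) else ns) 0
-- the while loop, with fuel as a totality guard (never exhausted: each iteration
-- either returns or adds a fresh state, and there are at most 2^25 + 1 of them)
def loopA (fuel : Nat) (states : PySem.Set Int) (state : Int) : Int :=
  match fuel with
  | 0 => state
  | fuel + 1 =>
    if state ∈ states then state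
    else loopA fuel (states.add state) (tickA state)

def get_first_repeat_state (state : Int) : Int :=
  loopA (2 ^ 26) ((PySem.Set.empty).add state) (tickA state)

-- ===== PORT B =====
-- NEIGHBORS: for each cell i, the indices at Manhattan distance 1 on the 5x5 grid
def neighB : List (List Int) :=
  (PySem.List.pyRange 0 25 1).map (fun i =>
    (PySem.List.pyRange 0 25 1).filter (fun j =>
      |PySem.Int.mod j 5 - PySem.Int.mod i 5| + |PySem.Int.floordiv j 5 - PySem.Int.floordiv i 5| == 1))
def tickB (s : Int) : Int :=
  (PySem.List.pyRange 0 25 1).foldl (fun out i =>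
    let n := (PySem.List.pyGetD neighB i []).foldl (fun a j => a + PySem.Int.band (s >>> j.toNat) 1) 0
    if (if PySem.Int.band (s >>> i.toNat) 1 ≠ 0 then n = 1 else 1 ≤ n ∧ n ≤ 2) then
      PySem.Int.bor out ((1:Int) <<< i.toNat)
    else out) 0
-- inner 'for _ in range(m): if s == cur: return cur; s = _tick(s)' as countdown recursion
def scanB (r : Nat) (s cur : Int) : Bool :=
  match r with
  | 0 => false
  | r + 1 => if s = cur then true else scanB r (tickB s) cur

-- outer 'while True', with fuel as a totality guard (never exhausted, as for A)
def loopB (x0 : Int) (fuel m : Nat) (cur : Int) : Int :=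
  match fuel with
  | 0 => cur
  | fuel + 1 =>
    if scanB m x0 cur then cur
    else loopB x0 fuel (m + 1) (tickB cur)

def get_first_repeat_state_alt (state : Int) : Int :=
  loopB state (2 ^ 26) 1 (tickB state)

-- ===== PRECONDITION & SPEC =====
def Spec_get_first_repeat_state (state : Int) (out : Int) : Prop := out = get_first_repeat_state_alt state
instance (state : Int) (out : Int) : Decidable (Spec_get_first_repeat_state state out) := by unfold Spec_get_first_repeat_state; infer_instance

-- ===== CLAIM (what is proved, stated in full; the proofs are below) =====
def Claim_equal_get_first_repeat_state : Prop := ∀ (state : Int), Dom_get_first_repeat_state state → Spec_get_first_repeat_state state (get_first_repeat_state state)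

-- ===== LEMMAS AND PROOFS =====

theorem shr_zero_int (s : Int) : s >>> (0:ℤ) = s := by
  rw [show ((0:ℤ)) = ((0:ℕ):ℤ) from rfl, Int.shiftRight_natCast_right]
  exact Int.shiftRight_zero s

theorem band_one_cases (s : Int) : PySem.Int.band s 1 = 0 ∨ PySem.Int.band s 1 = 1 := by
  simp [PySem.Int.band]; omega
theorem cell_eq (out E c nA nB : Int) (hc : c = 0 ∨ c = 1) (hn : nA = nB) :
    (if (if c = 0 then 1 ≤ nB ∧ nB ≤ 2 else nB = 1) then E else out)
      = (if (c = 1 ∧ nA = 1) ∨ (c = 0 ∧ (0 < nA ∧ nA < 3)) then E else out) := by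
  subst hn
  rcases hc with h | h <;> subst h <;> (simp; try refine if_congr (by omega) rfl rfl)
theorem neighB_lit : neighB = [[1, 5], [0, 2, 6], [1, 3, 7], [2, 4, 8], [3, 9], [0, 6, 10], [1, 5, 7, 11], [2, 6, 8, 12], [3, 7, 9, 13], [4, 8, 14], [5, 11, 15], [6, 10, 12, 16], [7, 11, 13, 17], [8, 12, 14, 18], [9, 13, 19], [10, 16, 20], [11, 15, 17, 21], [12, 16, 18, 22], [13, 17, 19, 23], [14, 18, 24], [15, 21], [16, 20, 22], [17, 21, 23], [18, 22, 24], [19, 23]] := by decide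
set_option maxHeartbeats 4000000 in
theorem tickB_eq (s : Int) : tickB s = tickA s := by
  unfold tickB tickA
  rw [neighB_lit]
  apply PySem.List.foldl_congr_mem
  intro out i hi
  rw [show PySem.List.pyRange 0 25 1 = [0,1,2,3,4,5,6,7,8,9,10,11,12,13,14,15,16,17,18,19,20,21,22,23,24] from by decide] at hi
  fin_cases hi <;>
  · simp [PySem.List.pyGetD, PySem.Int.floordiv, PySem.Int.mod]
    simp only [← Int.shiftRight_natCast_right, Nat.cast_ofNat, Nat.cast_one, shr_zero_int]
    refine cell_eq _ _ _ _ _ ?_ ?_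
    · exact band_one_cases _
    · omega

-- scanB m s v searches the iterates s, f s, …, f^[m-1] s for v
theorem scanB_iff (m : Nat) (s v : Int) :
    scanB m s v = true ↔ ∃ j < m, tickA^[j] s = v := by
  induction m generalizing s with
  | zero => simp [scanB]
  | succ m ih =>
    rw [scanB]
    by_cases h : s = v
    · simp only [if_pos h, true_iff]
      exact ⟨0, Nat.succ_pos m, h⟩
    · rw [if_neg h, tickB_eq, ih]
      constructor
      · rintro ⟨j, hj, hv⟩
        refine ⟨j + 1, by omega, ?_⟩
        rw [Function.iterate_succ_apply]; exact hv
      · rintro ⟨j, hj, hv⟩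
        cases j with
        | zero => exact absurd hv h
        | succ j =>
          refine ⟨j, by omega, ?_⟩
          rw [Function.iterate_succ_apply] at hv; exact hv

-- bisimulation: A's set loop and B's staged search advance in lockstep
theorem loop_bisim (x0 : Int) (fuel : Nat) : ∀ (m : Nat) (S : PySem.Set Int) (cur : Int),
    (∀ v : Int, v ∈ S ↔ ∃ j < m, tickA^[j] x0 = v) → cur = tickA^[m] x0 →
    loopA fuel S cur = loopB x0 fuel m cur := by
  induction fuel with
  | zero => intro m S cur _ _; rfl
  | succ fuel ih =>
    intro m S cur hS hcur
    simp only [loopA, loopB]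
    have hmem : (cur ∈ S) = (scanB m x0 cur = true) := by
      simp [hS, scanB_iff]
    split_ifs with h1 h2 h2
    · rfl
    · exact absurd (hmem ▸ h1) h2
    · exact absurd (hmem.symm ▸ h2) h1
    · rw [tickB_eq]
      apply ih (m + 1) (S.add cur) (tickA cur)
      · intro v
        rw [PySem.Set.mem_add, hS]
        constructor
        · rintro (⟨j, hj, hv⟩ | hv)
          · exact ⟨j, by omega, hv⟩
          · exact ⟨m, by omega, by rw [← hcur, hv]⟩
        · rintro ⟨j, hj, hv⟩
          by_cases hjm : j < m
          · exact Or.inl ⟨j, hjm, hv⟩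
          · have hje : j = m := by omega
            subst hje; exact Or.inr (by rw [← hv, hcur])
      · rw [hcur]
        exact (Function.iterate_succ_apply' tickA m x0).symm

-- ===== VERDICT (by name: the statement is the Claim_ definition above) =====
theorem get_first_repeat_state_spec : Claim_equal_get_first_repeat_state := by
  intro state _
  unfold Spec_get_first_repeat_state get_first_repeat_state get_first_repeat_state_alt
  rw [tickB_eq]
  apply loop_bisim state (2 ^ 26) 1
  · intro v
    rw [PySem.Set.mem_add]
    constructor
    · rintro (hv | hv)
      · simp [PySem.Set.empty] at hv
      · exact ⟨0, Nat.one_pos, by simpa using hv.symm⟩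
    · rintro ⟨j, hj, hv⟩
      interval_cases j
      exact Or.inr (by simpa using hv.symm)
  · rw [Function.iterate_one]
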